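-- pv_equiv track=rewrite | github.com/sagikel/Wave-Editor | wave_editor.py | modulo_not_zero
-- ===== SOURCE A (Python) =====
-- from copy import deepcopy
-- import math
--
-- def find_longer_lst(audio_lst1, audio_lst2):
--     """This function finds the longer list out of the audio lists."""
--     if len(audio_lst1) >= len(audio_lst2):
--         max_audio = audio_lst1
--     else:
--         max_audio = audio_lst2
--     return deepcopy(max_audio)
--
-- def divide_lst_helper(frame_rate1, frame_rate2, audio_lst1, audio_lst2):
--     """This function divides the longer audio list to smaller lists in the
--     size of (frame rate / gcd). All these smaller lists are in one long list.
--     This function excludes the modulo."""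
--     gcd = math.gcd(frame_rate1, frame_rate2)
--     max_num = int(max(frame_rate1, frame_rate2) / gcd)
--     new_lst = []
--     max_lst = find_longer_lst(audio_lst1, audio_lst2)
--     for i in range(int(len(max_lst)/max_num)):
--         new_lst.append([])    # create empty lists in the needed amount
--     start = 0
--     stop = max_num
--     while stop <= len(max_lst):
--         for i in range(len(new_lst)):
--             for j in range(start, stop):
--                 new_lst[i].append(list((max_lst[j])))
--             start += max_num
--             stop += max_num
--     return gcd, max_num, max_lst, new_lst
--
-- def divide_lst(frame_rate1, frame_rate2, audio_lst1, audio_lst2):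
--     """This function takes the list from the former function and adds a
--     list of the modulo."""
--     gcd, max_num, max_lst, new_lst = \
--         divide_lst_helper(frame_rate1, frame_rate2, audio_lst1, audio_lst2)
--     modulo = len(max_lst) % max_num
--     if modulo != 0:
--         new_lst.append([])
--
--     for j in range(modulo, 0, -1):
--         new_lst[-1].append(max_lst[-j])
--
--     return gcd, modulo, new_lst
--
-- def modulo_not_zero(frame_rate1, frame_rate2, audio_lst1, audio_lst2):
--     """This function helps the former one when the modulo is not zero."""
--     gcd, modulo, lst = divide_lst(frame_rate1, frame_rate2,
--                                   audio_lst1, audio_lst2)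
--     min_num = int(min(frame_rate1, frame_rate2) / gcd)
--     new_lst = []
--     for inner_lists in lst[:-1]:
--         for j in range(min_num):
--             new_lst.append(inner_lists[j])
--     if modulo == 1:
--         new_lst.extend(lst[-1])
--     elif len(lst[-1]) < min_num:
--         new_lst.append(lst[-1])
--     else:
--         for j in range(min_num):
--             new_lst.append(lst[-1][j])
--     return new_lst
-- ===== SOURCE B (Python) =====
-- import math
--
--
-- def modulo_not_zero(frame_rate1, frame_rate2, audio_lst1, audio_lst2):
--     """Single-pass rewrite: index straight into the longer list instead of
--     materialising the intermediate chunk-of-chunks structure."""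
--     lst = audio_lst1 if len(audio_lst1) >= len(audio_lst2) else audio_lst2
--     gcd = math.gcd(frame_rate1, frame_rate2)
--     big = max(frame_rate1, frame_rate2) // gcd
--     small = max(min(frame_rate1, frame_rate2) // gcd, 0)
--     n = len(lst)
--     result = []
--     for i in range(n // big):
--         result.extend(list(lst[i * big + j]) for j in range(small))
--     modulo = n % big
--     if modulo != 0:
--         rest = lst[n - modulo:]
--         if modulo == 1:
--             result.extend(rest)
--         elif modulo < small:
--             result.append(rest)
--         else:
--             result.extend(rest[:small])
--     return result
-- ===== Notes on version B (the rewrite author's own statement) =====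
-- stated objective: simpler
-- what changed: B replaces A's three-stage pipeline (materialise the longer list into a padded chunk-of-chunks structure via a while/for loop with running start/stop cursors, then re-traverse it) by a single pass that indexes straight into the longer list with i*big+j arithmetic and slices off the remainder.
import Mathlib
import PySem

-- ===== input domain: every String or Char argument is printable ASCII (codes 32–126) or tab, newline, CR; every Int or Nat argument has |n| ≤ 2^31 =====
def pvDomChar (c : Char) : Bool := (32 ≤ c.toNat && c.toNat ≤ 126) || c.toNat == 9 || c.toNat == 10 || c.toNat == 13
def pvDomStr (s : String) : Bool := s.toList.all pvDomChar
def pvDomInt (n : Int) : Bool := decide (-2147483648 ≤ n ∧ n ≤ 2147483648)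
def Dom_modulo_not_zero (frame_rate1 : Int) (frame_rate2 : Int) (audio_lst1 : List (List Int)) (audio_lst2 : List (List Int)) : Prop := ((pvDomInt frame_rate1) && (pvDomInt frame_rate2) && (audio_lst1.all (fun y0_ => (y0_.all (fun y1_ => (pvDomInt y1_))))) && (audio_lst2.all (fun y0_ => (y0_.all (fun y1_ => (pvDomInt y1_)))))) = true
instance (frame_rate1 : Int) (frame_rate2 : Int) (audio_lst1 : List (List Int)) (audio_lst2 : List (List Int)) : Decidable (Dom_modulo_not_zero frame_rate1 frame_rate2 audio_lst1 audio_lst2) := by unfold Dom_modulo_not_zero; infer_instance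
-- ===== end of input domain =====

-- ===== PORT A =====
-- B inlines A's chunk-of-chunks pipeline into one indexed pass; return values proved equal on Pre_.
-- Helpers for the while/for loop of divide_lst_helper (mutating new_lst[i] and the start/stop cursors).
def pvChunkStep (maxLst : List (List Int)) (maxNum : Int)
    (s : List (List (List Int)) × Int × Int) (i : Nat) : List (List (List Int)) × Int × Int :=
  -- for j in range(start, stop): new_lst[i].append(list(max_lst[j]));  start += max_num; stop += max_num
  (s.1.set i ((PySem.List.pyRange s.2.1 s.2.2 1).foldl
      (fun acc j => acc ++ [PySem.List.pyGetD maxLst j []]) (s.1.getD i [])),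
   s.2.1 + maxNum, s.2.2 + maxNum)

def pvForPass (maxLst : List (List Int)) (maxNum : Int)
    (s : List (List (List Int)) × Int × Int) : List (List (List Int)) × Int × Int :=
  -- for i in range(len(new_lst)): ...
  (List.range s.1.length).foldl (pvChunkStep maxLst maxNum) s

def pvWhile (maxLst : List (List Int)) (maxNum : Int) :
    Nat → List (List (List Int)) × Int × Int → List (List (List Int))
  | 0, s => s.1          -- fuel exhausted: the Python while loop diverges (maxNum < 0; outside Pre_)
  | fuel + 1, s =>
      if s.2.2 ≤ (maxLst.length : Int) then pvWhile maxLst maxNum fuel (pvForPass maxLst maxNum s)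
      else s.1

def modulo_not_zero (frame_rate1 : Int) (frame_rate2 : Int) (audio_lst1 : List (List Int)) (audio_lst2 : List (List Int)) : List (List Int) :=
  let gcd : Int := Int.gcd frame_rate1 frame_rate2
  if gcd = 0 then []     -- Python: ZeroDivisionError (both frame rates 0); outside Pre_
  else
    -- int(max/gcd): exact, since gcd divides both rates and |rate| <= 2^31 keeps the float exact
    let maxNum : Int := (max frame_rate1 frame_rate2).tdiv gcd
    -- find_longer_lst (deepcopy is the identity on values)
    let maxLst : List (List Int) := if audio_lst1.length ≥ audio_lst2.length then audio_lst1 else audio_lst2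
    if maxNum ≤ 0 then []   -- Python: ZeroDivisionError (maxNum = 0) / infinite while loop (maxNum < 0); outside Pre_
    else
      -- for i in range(int(len(max_lst)/max_num)): new_lst.append([])
      let newLst0 : List (List (List Int)) :=
        (List.range ((maxLst.length : Int).tdiv maxNum).toNat).foldl (fun acc _ => acc ++ [[]]) []
      let newLst := pvWhile maxLst maxNum (maxLst.length + 1) (newLst0, 0, maxNum)
      -- divide_lst
      let modulo : Int := PySem.Int.mod (maxLst.length : Int) maxNum
      let lst0 := if modulo ≠ 0 then newLst ++ [([] : List (List Int))] else newLst
      -- for j in range(modulo, 0, -1): lst[-1].append(max_lst[-j])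
      let lst := (PySem.List.pyRange modulo 0 (-1)).foldl
        (fun cur j => cur.dropLast ++ [PySem.List.pyGetD cur (-1) [] ++ [PySem.List.pyGetD maxLst (-j) []]]) lst0
      -- modulo_not_zero body
      let minNum : Int := (min frame_rate1 frame_rate2).tdiv gcd
      let newLst2 := (PySem.List.slice lst none (some (-1))).foldl
        (fun acc inner =>
          (PySem.List.pyRange 0 minNum 1).foldl (fun acc2 j => acc2 ++ [PySem.List.pyGetD inner j []]) acc) []
      let lastC := PySem.List.pyGetD lst (-1) []   -- lst[-1]; IndexError on two empty lists, outside Pre_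
      if modulo = 1 then newLst2 ++ lastC
      else if (lastC.length : Int) < minNum then
        -- Python appends the nested list lst[-1] itself: no List (List Int) value exists; outside Pre_
        newLst2 ++ [lastC.flatten]
      else (PySem.List.pyRange 0 minNum 1).foldl (fun acc j => acc ++ [PySem.List.pyGetD lastC j []]) newLst2

-- ===== PORT B =====
def modulo_not_zero_alt (frame_rate1 : Int) (frame_rate2 : Int) (audio_lst1 : List (List Int)) (audio_lst2 : List (List Int)) : List (List Int) :=
  let lst : List (List Int) := if audio_lst1.length ≥ audio_lst2.length then audio_lst1 else audio_lst2
  let gcd : Int := Int.gcd frame_rate1 frame_rate2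
  if gcd = 0 then []      -- Python: ZeroDivisionError; outside Pre_
  else
    let big : Int := PySem.Int.floordiv (max frame_rate1 frame_rate2) gcd
    if big = 0 then []    -- Python: ZeroDivisionError on n // big; outside Pre_ (totality guard only)
    else
      let small : Int := max (PySem.Int.floordiv (min frame_rate1 frame_rate2) gcd) 0
      let n : Int := lst.length
      -- for i in range(n // big): result.extend(list(lst[i*big + j]) for j in range(small))
      let result := (PySem.List.pyRange 0 (PySem.Int.floordiv n big) 1).foldl
        (fun acc i => acc ++ (PySem.List.pyRange 0 small 1).map (fun j => PySem.List.pyGetD lst (i * big + j) [])) []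
      let modulo : Int := PySem.Int.mod n big
      if modulo ≠ 0 then
        let rest := PySem.List.slice lst (some (n - modulo)) none
        if modulo = 1 then result ++ rest
        else if modulo < small then
          result ++ [rest.flatten]  -- Python appends the nested list rest itself; outside Pre_
        else result ++ PySem.List.slice rest none (some small)
      else result

-- ===== PRECONDITION & SPEC =====
-- Pre_ excludes: (i) frame rates both <= 0 (A divides by zero or its while loop never terminates),
-- (ii) both audio lists empty (A raises IndexError on lst[-1]), and (iii) 1 < len%chunk < min-chunk,
-- where A returns a heterogeneous list (the raw remainder list nested as one element) that is not a
-- value of the declared type List (List Int).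
def Pre_modulo_not_zero (frame_rate1 : Int) (frame_rate2 : Int) (audio_lst1 : List (List Int)) (audio_lst2 : List (List Int)) : Prop :=
  (0 < frame_rate1 ∨ 0 < frame_rate2) ∧
  (audio_lst1 ≠ [] ∨ audio_lst2 ≠ []) ∧
  (let L : List (List Int) := if audio_lst1.length ≥ audio_lst2.length then audio_lst1 else audio_lst2
   let g : Int := Int.gcd frame_rate1 frame_rate2
   let md : Int := (L.length : Int) % (max frame_rate1 frame_rate2 / g)
   md ≤ 1 ∨ min frame_rate1 frame_rate2 / g ≤ md)

instance (frame_rate1 : Int) (frame_rate2 : Int) (audio_lst1 : List (List Int)) (audio_lst2 : List (List Int)) : Decidable (Pre_modulo_not_zero frame_rate1 frame_rate2 audio_lst1 audio_lst2) := by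
  unfold Pre_modulo_not_zero; infer_instance

def pvWitness_modulo_not_zero : Int × Int × List (List Int) × List (List Int) :=
  (2, 3, [[1], [2], [3], [4], [5], [6], [7]], [])

def Spec_modulo_not_zero (frame_rate1 : Int) (frame_rate2 : Int) (audio_lst1 : List (List Int)) (audio_lst2 : List (List Int)) (out : List (List Int)) : Prop := out = modulo_not_zero_alt frame_rate1 frame_rate2 audio_lst1 audio_lst2
instance (frame_rate1 : Int) (frame_rate2 : Int) (audio_lst1 : List (List Int)) (audio_lst2 : List (List Int)) (out : List (List Int)) : Decidable (Spec_modulo_not_zero frame_rate1 frame_rate2 audio_lst1 audio_lst2 out) := by unfold Spec_modulo_not_zero; infer_instance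

-- ===== CLAIM (what is proved, stated in full; the proofs are below) =====
def Claim_equal_modulo_not_zero : Prop := ∀ (frame_rate1 : Int) (frame_rate2 : Int) (audio_lst1 : List (List Int)) (audio_lst2 : List (List Int)), Dom_modulo_not_zero frame_rate1 frame_rate2 audio_lst1 audio_lst2 → Pre_modulo_not_zero frame_rate1 frame_rate2 audio_lst1 audio_lst2 → Spec_modulo_not_zero frame_rate1 frame_rate2 audio_lst1 audio_lst2 (modulo_not_zero frame_rate1 frame_rate2 audio_lst1 audio_lst2)

-- ===== LEMMAS AND PROOFS =====

theorem pvMapIdx {α : Type} (L : List α) (d : α) (a c : Nat) (h : a + c ≤ L.length) :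
    (List.range c).map (fun k : Nat => PySem.List.pyGetD L ((a : Int) + (k : Int)) d) =
      (L.drop a).take c := by
  apply List.ext_getElem
  · simp; omega
  · intro i h1 h2
    simp only [List.getElem_map, List.getElem_range, List.getElem_take, List.getElem_drop]
    have : ((a : Int) + (i : Int)) = ((a + i : Nat) : Int) := by push_cast; ring
    rw [this, PySem.List.pyGetD_natCast]
    simp at h1
    rw [List.getD_eq_getElem _ _ (by omega)]

theorem pvSelect_spec (c : List (List Int)) (m : Int) (hm : m ≤ (c.length : Int))
    (acc : List (List Int)) :
    (PySem.List.pyRange 0 m 1).foldl (fun acc2 j => acc2 ++ [PySem.List.pyGetD c j []]) acc =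
      acc ++ c.take m.toNat := by
  rw [PySem.List.foldl_append_singleton_eq_map, PySem.List.pyRange_one, List.map_map]
  have := pvMapIdx c [] 0 m.toNat (by omega)
  simp only [Nat.cast_zero, zero_add] at this ⊢
  rw [show (m - 0).toNat = m.toNat from by omega]
  rw [show ((fun j => PySem.List.pyGetD c j []) ∘ fun k : Nat => (k : Int)) =
      (fun k : Nat => PySem.List.pyGetD c (k : Int) []) from rfl, this, List.drop_zero]

theorem pvCountdown_aux (L : List (List Int)) (front : List (List (List Int))) :
    ∀ (t : Nat), t ≤ L.length → ∀ (lastc : List (List Int)),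
    (PySem.List.pyRange (t : Int) 0 (-1)).foldl
        (fun cur j => cur.dropLast ++ [PySem.List.pyGetD cur (-1) [] ++ [PySem.List.pyGetD L (-j) []]])
        (front ++ [lastc]) =
      front ++ [lastc ++ L.drop (L.length - t)] := by
  intro t
  induction t with
  | zero => intro _ lastc; rw [PySem.List.pyRange_neg_one_eq_nil (by omega)]; simp
  | succ t ih =>
    intro ht lastc
    rw [PySem.List.pyRange_neg_one_cons (by omega : (0:Int) < ((t+1 : Nat) : Int))]
    simp only [List.foldl_cons, List.dropLast_concat, PySem.List.pyGetD_neg_one_append_singleton]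
    rw [show (-((t+1 : Nat) : Int)) = -(((t+1 : Nat) : Nat) : Int) from by push_cast; ring]
    rw [PySem.List.pyGetD_neg_natCast L (t+1) [] (by omega) (by omega)]
    rw [show (((t+1 : Nat) : Int) - 1) = (t : Int) from by push_cast; ring] -- range tail
    rw [ih (by omega) (lastc ++ [L[L.length - (t+1)]])]
    have hdrop : List.drop (L.length - (t+1)) L = L[L.length - (t+1)] :: List.drop (L.length - t) L := by
      rw [List.drop_eq_getElem_cons (by omega)]
      congr 2
      omega
    rw [hdrop]
    simp

theorem pvGetD_append_cons {α : Type} (pre : List α) (x : α) (rest : List α) (d : α) :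
    (pre ++ x :: rest).getD pre.length d = x := by
  induction pre with
  | nil => rfl
  | cons a t ih => simp [ih]

theorem pvSet_append_cons {α : Type} (pre : List α) (x v : α) (rest : List α) :
    (pre ++ x :: rest).set pre.length v = pre ++ v :: rest := by
  induction pre with
  | nil => rfl
  | cons a t ih => simp [ih]

theorem pvForPass_aux (L : List (List Int)) (M : Int) :
    ∀ (t s : Nat) (done : List (List (List Int))), done.length = s →
    (List.range' s t).foldl (pvChunkStep L M) (done ++ List.replicate t [], (s : Int) * M, (s : Int) * M + M) =
      (done ++ (List.range' s t).map (fun i : Nat =>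
          (PySem.List.pyRange ((i : Int) * M) ((i : Int) * M + M) 1).map
            (fun j => PySem.List.pyGetD L j [])),
       ((s + t : Nat) : Int) * M, ((s + t : Nat) : Int) * M + M) := by
  intro t
  induction t with
  | zero => intro s done hd; simp
  | succ t ih =>
    intro s done hd
    rw [List.range'_succ, List.foldl_cons]
    have hstep : pvChunkStep L M (done ++ List.replicate (t+1) [], (s : Int) * M, (s : Int) * M + M) s =
        (done ++ ((PySem.List.pyRange ((s : Int) * M) ((s : Int) * M + M) 1).map
            (fun j => PySem.List.pyGetD L j [])) :: List.replicate t [],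
         ((s+1 : Nat) : Int) * M, ((s+1 : Nat) : Int) * M + M) := by
      unfold pvChunkStep
      simp only [List.replicate_succ]
      rw [← hd, pvGetD_append_cons, pvSet_append_cons,
        PySem.List.foldl_append_singleton_eq_map]
      simp only [List.nil_append, Prod.mk.injEq]
      and_intros <;> first | trivial | (push_cast; ring)
    rw [hstep]
    have := ih (s+1) (done ++ [((PySem.List.pyRange ((s : Int) * M) ((s : Int) * M + M) 1).map
            (fun j => PySem.List.pyGetD L j []))]) (by simp [hd])
    rw [List.append_assoc] at this
    simp only [List.singleton_append] at this
    rw [this]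
    simp only [List.map_cons, List.cons_append, List.nil_append, Prod.mk.injEq,
      List.append_assoc, List.singleton_append]
    and_intros <;> first | trivial | (push_cast; ring)

theorem pvForPass_spec (L : List (List Int)) (M : Int) (K : Nat) :
    pvForPass L M (List.replicate K [], 0, M) =
      ((List.range K).map (fun i : Nat =>
          (PySem.List.pyRange ((i : Int) * M) ((i : Int) * M + M) 1).map
            (fun j => PySem.List.pyGetD L j [])),
       (K : Int) * M, ((K : Int) + 1) * M) := by
  have := pvForPass_aux L M K 0 [] rfl
  simp only [List.nil_append, Nat.cast_zero, zero_mul, zero_add] at this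
  unfold pvForPass
  simp only [List.length_replicate, List.range_eq_range']
  rw [this]
  simp only [Prod.mk.injEq, List.range_eq_range']
  and_intros <;> first | trivial | (push_cast; ring)

theorem pvWhile_spec (L : List (List Int)) (M : Int) (hM : 0 < M) (K : Nat)
    (hK : (K : Int) = (L.length : Int) / M) (fuel : Nat) (hfuel : K + 1 ≤ fuel) :
    pvWhile L M fuel (List.replicate K [], 0, M) =
      (List.range K).map (fun i : Nat =>
        (PySem.List.pyRange ((i : Int) * M) ((i : Int) * M + M) 1).map
          (fun j => PySem.List.pyGetD L j [])) := by
  obtain ⟨f, rfl⟩ : ∃ f, fuel = f + 1 := ⟨fuel - 1, by omega⟩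
  by_cases hK0 : K = 0
  · subst hK0
    have hlt : (L.length : Int) < M := by
      by_contra hc
      have : (1 : Int) ≤ (L.length : Int) / M := by
        rw [Int.le_ediv_iff_mul_le hM]; omega
      omega
    simp only [pvWhile, List.replicate_zero]
    rw [if_neg (by omega)]
    simp
  · obtain ⟨f', rfl⟩ : ∃ f', f = f' + 1 := ⟨f - 1, by omega⟩
    have hMle : M ≤ (L.length : Int) := by
      have : (1 : Int) ≤ (L.length : Int) / M := by rw [← hK]; omega
      rw [Int.le_ediv_iff_mul_le hM] at this; omega
    simp only [pvWhile]
    rw [if_pos (by simpa using hMle)]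
    rw [pvForPass_spec]
    have hstop : ¬ (((K : Int) + 1) * M ≤ (L.length : Int)) := by
      intro hc
      have : (K : Int) + 1 ≤ (L.length : Int) / M := by rw [Int.le_ediv_iff_mul_le hM]; omega
      omega
    simp only [pvWhile]
    rw [if_neg (by simpa using hstop)]

theorem pvChunk_drop (L : List (List Int)) (M : Int) (hM : 0 < M) (i : Nat)
    (hbound : ((i : Int) + 1) * M ≤ (L.length : Int)) :
    (PySem.List.pyRange ((i : Int) * M) ((i : Int) * M + M) 1).map
        (fun j => PySem.List.pyGetD L j []) =
      (L.drop (i * M.toNat)).take M.toNat := by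
  rw [PySem.List.pyRange_one, List.map_map]
  rw [show ((i : Int) * M + M - (i : Int) * M) = M from by ring]
  rw [show ((fun j => PySem.List.pyGetD L j []) ∘ fun k : Nat => (i : Int) * M + (k : Int)) =
      (fun k : Nat => PySem.List.pyGetD L (((i * M.toNat : Nat) : Int) + (k : Int)) []) from by
    funext k; simp only [Function.comp]; congr 1; push_cast; rw [Int.toNat_of_nonneg (by omega)]]
  exact pvMapIdx L [] (i * M.toNat) M.toNat (by
    have h1 : ((i * M.toNat : Nat) : Int) = (i : Int) * M := by
      push_cast; rw [Int.toNat_of_nonneg (by omega)]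
    have h2 : (M.toNat : Int) = M := Int.toNat_of_nonneg (by omega)
    have h3 : ((i : Int) + 1) * M = (i : Int) * M + M := by ring
    omega)

theorem pvChunkB_drop (L : List (List Int)) (M c : Int) (hM : 0 < M) (hc : 0 ≤ c) (i : Nat)
    (hbound : (i : Int) * M + c ≤ (L.length : Int)) :
    (PySem.List.pyRange 0 c 1).map (fun j => PySem.List.pyGetD L ((i : Int) * M + j) []) =
      (L.drop (i * M.toNat)).take c.toNat := by
  rw [PySem.List.pyRange_one, List.map_map]
  rw [show ((c : Int) - 0) = c from by ring]
  rw [show ((fun j => PySem.List.pyGetD L ((i : Int) * M + j) []) ∘ fun k : Nat => (0 : Int) + (k : Int)) =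
      (fun k : Nat => PySem.List.pyGetD L (((i * M.toNat : Nat) : Int) + (k : Int)) []) from by
    funext k; simp only [Function.comp]; congr 1; push_cast; rw [Int.toNat_of_nonneg (by omega)]; ring]
  exact pvMapIdx L [] (i * M.toNat) c.toNat (by
    have h1 : ((i * M.toNat : Nat) : Int) = (i : Int) * M := by
      push_cast; rw [Int.toNat_of_nonneg (by omega)]
    have h2 : (c.toNat : Int) = c := Int.toNat_of_nonneg hc
    omega)

theorem modulo_not_zero_eq (frame_rate1 : Int) (frame_rate2 : Int) (audio_lst1 : List (List Int)) (audio_lst2 : List (List Int))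
    (hpre : Pre_modulo_not_zero frame_rate1 frame_rate2 audio_lst1 audio_lst2) :
    modulo_not_zero frame_rate1 frame_rate2 audio_lst1 audio_lst2 =
      modulo_not_zero_alt frame_rate1 frame_rate2 audio_lst1 audio_lst2 := by
  obtain ⟨hfr, hne, hmd3⟩ := hpre
  set L : List (List Int) :=
    if audio_lst1.length ≥ audio_lst2.length then audio_lst1 else audio_lst2 with hLdef
  have hgpos : 0 < Int.gcd frame_rate1 frame_rate2 :=
    Int.gcd_pos_iff.mpr (by rcases hfr with h | h; exacts [Or.inl (by omega), Or.inr (by omega)])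
  set g : Int := (Int.gcd frame_rate1 frame_rate2 : Int) with hgdef
  have hg : (0 : Int) < g := by rw [hgdef]; exact_mod_cast hgpos
  have hmax : 0 < max frame_rate1 frame_rate2 := by rcases hfr with h | h <;> simp <;> omega
  have hdvd_max : g ∣ max frame_rate1 frame_rate2 := by
    rcases max_choice frame_rate1 frame_rate2 with h | h <;> rw [h]
    · exact Int.gcd_dvd_left _ _
    · exact Int.gcd_dvd_right _ _
  have hdvd_min : g ∣ min frame_rate1 frame_rate2 := by
    rcases min_choice frame_rate1 frame_rate2 with h | h <;> rw [h]
    · exact Int.gcd_dvd_left _ _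
    · exact Int.gcd_dvd_right _ _
  set M : Int := max frame_rate1 frame_rate2 / g with hMdef
  set m : Int := min frame_rate1 frame_rate2 / g with hmdef
  have hM : 0 < M := by
    have h1 : (1 : Int) ≤ max frame_rate1 frame_rate2 / g :=
      (Int.le_ediv_iff_mul_le hg).mpr (by simpa using Int.le_of_dvd hmax hdvd_max)
    omega
  have hmM : m ≤ M := Int.ediv_le_ediv hg (min_le_max)
  have htdiv_max : (max frame_rate1 frame_rate2).tdiv g = M :=
    Int.tdiv_eq_ediv_of_dvd hdvd_max
  have htdiv_min : (min frame_rate1 frame_rate2).tdiv g = m :=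
    Int.tdiv_eq_ediv_of_dvd hdvd_min
  have hLlen : 0 < L.length := by
    rw [hLdef]
    split <;> rename_i hsp
    · rcases hne with h | h
      · exact List.length_pos_iff.mpr h
      · have := List.length_pos_iff.mpr h; omega
    · rcases hne with h | h
      · have := List.length_pos_iff.mpr h; omega
      · exact List.length_pos_iff.mpr h
  set n : Int := (L.length : Int) with hndef
  have hn0 : 0 < n := by rw [hndef]; exact_mod_cast hLlen
  have hKnn : 0 ≤ n / M := Int.ediv_nonneg (by omega) (by omega)
  set K : Nat := (n / M).toNat with hKdef
  have hK : (K : Int) = n / M := by rw [hKdef]; exact Int.toNat_of_nonneg hKnn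
  have htdiv_n : n.tdiv M = n / M := by
    rw [Int.tdiv_eq_ediv]; rw [if_pos (Or.inl (by omega))]; ring
  have hKM : M * ((K : Int)) + n % M = n := by rw [hK]; exact Int.mul_ediv_add_emod n M
  have hmod : PySem.Int.mod n M = n % M := PySem.Int.mod_eq_emod_of_pos hM
  set md : Int := n % M with hmddef
  have hmd0 : 0 ≤ md := Int.emod_nonneg n (by omega)
  have hmdM : md < M := Int.emod_lt_of_pos n hM
  have hKMnn : 0 ≤ M * (K : Int) := by positivity
  have hmdn : md ≤ n := by omega
  have hKlen : K ≤ L.length := by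
    have h1 : n / M ≤ n := Int.ediv_le_self M (show (0:Int) ≤ n by omega)
    omega
  have hnew0 : (List.range K).foldl (fun acc _ => acc ++ [[]]) ([] : List (List (List Int))) =
      List.replicate K [] := by
    rw [PySem.List.foldl_append_singleton_eq_map, List.map_const']
    simp
  have hmd3' : md ≤ 1 ∨ m ≤ md := by
    simp only [hmddef, hndef, hmdef, hMdef, hgdef, hLdef]
    simpa using hmd3
  -- chunk shape facts
  have hchunkA : ∀ i : Nat, i < K →
      (PySem.List.pyRange ((i : Int) * M) ((i : Int) * M + M) 1).map
          (fun j => PySem.List.pyGetD L j []) =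
        (L.drop (i * M.toNat)).take M.toNat := by
    intro i hi
    refine pvChunk_drop L M hM i ?_
    have h1 : ((i : Int) + 1) ≤ (K : Int) := by exact_mod_cast hi
    have h2 : ((i : Int) + 1) * M ≤ (K : Int) * M :=
      mul_le_mul_of_nonneg_right h1 (by omega)
    have h3 : (K : Int) * M = M * (K : Int) := mul_comm _ _
    omega
  have hbound : ∀ i : Nat, i < K → ((i : Int) + 1) * M ≤ n := by
    intro i hi
    have h1 : ((i : Int) + 1) ≤ (K : Int) := by exact_mod_cast hi
    have h2 : ((i : Int) + 1) * M ≤ (K : Int) * M :=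
      mul_le_mul_of_nonneg_right h1 (by omega)
    have h3 : (K : Int) * M = M * (K : Int) := mul_comm _ _
    omega
  have hlenchunk : ∀ c ∈ (List.range K).map (fun i : Nat =>
      (PySem.List.pyRange ((i : Int) * M) ((i : Int) * M + M) 1).map
        (fun j => PySem.List.pyGetD L j [])), m ≤ (c.length : Int) := by
    intro c hc
    obtain ⟨i, hi, rfl⟩ := List.mem_map.mp hc
    simp only [List.length_map, PySem.List.length_pyRange_one]
    have : ((i : Int) * M + M - (i : Int) * M) = M := by ring
    rw [this]
    omega
  have hfoldgen : ∀ (l : List (List (List Int))) (acc : List (List Int)),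
      (∀ c ∈ l, m ≤ (c.length : Int)) →
      l.foldl (fun acc inner =>
          (PySem.List.pyRange 0 m 1).foldl
            (fun acc2 j => acc2 ++ [PySem.List.pyGetD inner j []]) acc) acc =
        acc ++ l.flatMap (fun c => c.take m.toNat) := by
    intro l acc h
    rw [PySem.List.foldl_congr_mem l _ (fun acc c => acc ++ c.take m.toNat) acc
      (fun acc c hc => pvSelect_spec c m (h c hc) acc)]
    exact PySem.List.foldl_append_eq_flatMap _ l acc
  have hAflat : ((List.range K).map (fun i : Nat =>
      (PySem.List.pyRange ((i : Int) * M) ((i : Int) * M + M) 1).map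
        (fun j => PySem.List.pyGetD L j []))).flatMap (fun c => c.take m.toNat) =
      (List.range K).flatMap (fun i => (L.drop (i * M.toNat)).take m.toNat) := by
    rw [List.flatMap_map]
    rw [List.flatMap_def, List.map_congr_left ?_, ← List.flatMap_def]
    intro i hi
    have hi' : i < K := List.mem_range.mp hi
    rw [hchunkA i hi', List.take_take]
    congr 1
    omega
  have hBflat : (PySem.List.pyRange 0 (K : Int) 1).foldl
      (fun acc i => acc ++ (PySem.List.pyRange 0 (max m 0) 1).map
        (fun j => PySem.List.pyGetD L (i * M + j) [])) [] =
      (List.range K).flatMap (fun i => (L.drop (i * M.toNat)).take m.toNat) := by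
    rw [PySem.List.foldl_append_eq_flatMap, PySem.List.pyRange_one 0 (K : Int)]
    simp only [Int.sub_zero, Int.toNat_natCast, List.nil_append]
    rw [List.flatMap_map]
    rw [List.flatMap_def, List.map_congr_left ?_, ← List.flatMap_def]
    intro i hi
    have hi' : i < K := List.mem_range.mp hi
    have hb : (i : Int) * M + max m 0 ≤ n := by
      have h1 := hbound i hi'
      have h2 : ((i : Int) + 1) * M = (i : Int) * M + M := by ring
      omega
    rw [show (fun j => PySem.List.pyGetD L ((0 + (i : Int)) * M + j) []) =
        (fun j => PySem.List.pyGetD L ((i : Int) * M + j) []) from by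
      funext j; congr 1; ring]
    rw [pvChunkB_drop L M (max m 0) hM (le_max_right m 0) i hb]
    congr 1
    omega
  simp only [modulo_not_zero, modulo_not_zero_alt, ← hgdef, ← hLdef, ← hndef]
  simp only [if_neg (show ¬ g = 0 from by omega)]
  have hfd_max : PySem.Int.floordiv (max frame_rate1 frame_rate2) g = M := by
    rw [PySem.Int.floordiv_eq_ediv_of_pos hg]
  have hfd_min : PySem.Int.floordiv (min frame_rate1 frame_rate2) g = m := by
    rw [PySem.Int.floordiv_eq_ediv_of_pos hg]
  have hfd_n : PySem.Int.floordiv n M = (K : Int) := by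
    rw [PySem.Int.floordiv_eq_ediv_of_pos hM, hK]
  have hmodmd : PySem.Int.mod n M = md := by rw [hmod]
  simp only [htdiv_max, htdiv_min, htdiv_n, hfd_max, hfd_min, hfd_n, hmodmd, ← hK,
    Int.toNat_natCast, hnew0]
  simp only [if_neg (show ¬ M ≤ 0 from by omega), if_neg (show ¬ M = 0 from by omega)]
  rw [pvWhile_spec L M hM K (by rw [hK, hndef]) (L.length + 1) (by omega)]
  by_cases hmd : md = 0
  · -- no remainder: A re-adds the first m of the last full chunk; B's main loop already has it
    have hKne : K ≠ 0 := by
      intro h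
      rw [h] at hKM
      simp at hKM
      omega
    have hcne : (List.range K).map (fun i : Nat =>
        (PySem.List.pyRange ((i : Int) * M) ((i : Int) * M + M) 1).map
          (fun j => PySem.List.pyGetD L j [])) ≠ [] := by
      simp [hKne, List.range_eq_nil]
    simp only [hmd]
    rw [PySem.List.pyRange_neg_one_eq_nil (le_refl 0)]
    simp only [List.foldl_nil]
    simp only [if_neg (show ¬ ((0 : Int) ≠ 0) from by simp),
      if_neg (show (0 : Int) ≠ 1 from by norm_num)]
    rw [PySem.List.slice_to_neg_one]
    rw [hfoldgen _ _ (fun c hc => hlenchunk c (List.dropLast_subset _ hc))]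
    rw [PySem.List.pyGetD_neg_one _ _ hcne]
    rw [if_neg (show ¬ ((((List.range K).map (fun i : Nat =>
        (PySem.List.pyRange ((i : Int) * M) ((i : Int) * M + M) 1).map
          (fun j => PySem.List.pyGetD L j []))).getLast hcne).length : Int) < m from
      not_lt.mpr (hlenchunk _ (List.getLast_mem hcne)))]
    rw [pvSelect_spec _ m (hlenchunk _ (List.getLast_mem hcne)) _]
    rw [List.nil_append]
    rw [show ((List.range K).map (fun i : Nat =>
        (PySem.List.pyRange ((i : Int) * M) ((i : Int) * M + M) 1).map
          (fun j => PySem.List.pyGetD L j []))).dropLast.flatMap (fun c => c.take m.toNat) ++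
        (((List.range K).map (fun i : Nat =>
        (PySem.List.pyRange ((i : Int) * M) ((i : Int) * M + M) 1).map
          (fun j => PySem.List.pyGetD L j []))).getLast hcne).take m.toNat =
        ((List.range K).map (fun i : Nat =>
        (PySem.List.pyRange ((i : Int) * M) ((i : Int) * M + M) 1).map
          (fun j => PySem.List.pyGetD L j []))).flatMap (fun c => c.take m.toNat) from by
      conv_rhs => rw [← List.dropLast_append_getLast hcne]
      rw [List.flatMap_append]
      simp]
    rw [hAflat, hBflat]
  · -- remainder present
    simp only [if_pos (show md ≠ 0 from hmd)]
    have hcount := pvCountdown_aux L ((List.range K).map (fun i : Nat =>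
        (PySem.List.pyRange ((i : Int) * M) ((i : Int) * M + M) 1).map
          (fun j => PySem.List.pyGetD L j []))) md.toNat (by omega) []
    rw [show ((md.toNat : Nat) : Int) = md from by omega] at hcount
    rw [hcount]
    simp only [List.nil_append]
    rw [PySem.List.slice_to_neg_one, List.dropLast_concat]
    rw [hfoldgen _ _ hlenchunk]
    rw [PySem.List.pyGetD_neg_one_append_singleton]
    have hrest : PySem.List.slice L (some (n - md)) none = L.drop (L.length - md.toNat) := by
      rw [PySem.List.slice_from L (by omega)]
      congr 1
      omega
    have hremlen : ((L.drop (L.length - md.toNat)).length : Int) = md := by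
      simp only [List.length_drop]
      omega
    rw [hrest, hAflat, hBflat, List.nil_append]
    by_cases hmd1 : md = 1
    · simp only [if_pos hmd1]
    · simp only [if_neg hmd1]
      have hmmd : m ≤ md := by
        rcases hmd3' with h | h
        · omega
        · exact h
      have hmaxm : max m 0 ≤ md := by
        rcases le_total m 0 with h | h
        · rw [max_eq_right h]; omega
        · rw [max_eq_left h]; omega
      have hmax0 : (max m 0).toNat = m.toNat := by
        rcases le_total m 0 with h | h
        · rw [max_eq_right h]; omega
        · rw [max_eq_left h]
      rw [if_neg (show ¬ ((L.drop (L.length - md.toNat)).length : Int) < m from by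
        rw [hremlen]; omega)]
      rw [if_neg (not_lt.mpr hmaxm)]
      rw [pvSelect_spec _ m (by rw [hremlen]; exact hmmd) _]
      rw [PySem.List.slice_to _ (le_max_right m 0), hmax0]

-- ===== VERDICT (by name: the statement is the Claim_ definition above) =====
theorem modulo_not_zero_spec : Claim_equal_modulo_not_zero := by
  intro f1 f2 l1 l2 _ hpre
  exact modulo_not_zero_eq f1 f2 l1 l2 hpre
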